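-- pv_equiv track=rewrite | github.com/LocusLontrime/Python | Yandex_int/Sorted_subsequence.py | rec_core
-- ===== SOURCE A (Python) =====
-- import operator
--
-- def rec_core(i: int, arr: list[int], memo_table: dict[int, int], non_decr: bool):
--     if i not in memo_table.keys():
--         # border case:
--         counter = 1  # the element itself as valid subsequence:
--         bin_op = operator.le if non_decr else operator.ge
--         # cycling all left subs:
--         if i != 0:
--             for ind in range(i):
--                 if bin_op(arr[ind], arr[i]):
--                     counter += rec_core(ind, arr, memo_table, non_decr)
--         # write counter to memo table:
--         memo_table[i] = counter
--     # returning interim result: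
--     return memo_table[i]
-- ===== SOURCE B (Python) =====
-- import operator
--
-- def rec_core(i: int, arr: list[int], memo_table: dict[int, int], non_decr: bool):
--     # Iterative bottom-up DP: build dp[0..i] in one left-to-right pass,
--     # seeding entries from memo_table when present.  (Does not mutate memo_table.)
--     if i in memo_table:
--         return memo_table[i]
--     bin_op = operator.le if non_decr else operator.ge
--     dp = []
--     for j in range(i + 1):
--         if j in memo_table:
--             dp.append(memo_table[j])
--         else:
--             dp.append(1 + sum(dp[k] for k in range(j) if bin_op(arr[k], arr[j])))
--     return dp[i]
-- ===== Notes on version B (the rewrite author's own statement) =====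
-- stated objective: alternative
-- what changed: Replaces A's top-down memoized recursion (which mutates memo_table in place) with a non-mutating iterative bottom-up DP building dp[0..i] in one left-to-right pass; Pre_ excludes inputs where A raises IndexError (unmemoized i >= max(1,len(arr))) and unmemoized negative i, which is outside the function's natural domain (A's 1 there is an artefact of the empty range; B's dp naturally raises IndexError).
-- outside the precondition, e.g. on rec_core(-1, [], {}, True): A returns 1, B raises IndexError; on rec_core(1, [], {}, True): A raises IndexError, B raises IndexError
import Mathlib
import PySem

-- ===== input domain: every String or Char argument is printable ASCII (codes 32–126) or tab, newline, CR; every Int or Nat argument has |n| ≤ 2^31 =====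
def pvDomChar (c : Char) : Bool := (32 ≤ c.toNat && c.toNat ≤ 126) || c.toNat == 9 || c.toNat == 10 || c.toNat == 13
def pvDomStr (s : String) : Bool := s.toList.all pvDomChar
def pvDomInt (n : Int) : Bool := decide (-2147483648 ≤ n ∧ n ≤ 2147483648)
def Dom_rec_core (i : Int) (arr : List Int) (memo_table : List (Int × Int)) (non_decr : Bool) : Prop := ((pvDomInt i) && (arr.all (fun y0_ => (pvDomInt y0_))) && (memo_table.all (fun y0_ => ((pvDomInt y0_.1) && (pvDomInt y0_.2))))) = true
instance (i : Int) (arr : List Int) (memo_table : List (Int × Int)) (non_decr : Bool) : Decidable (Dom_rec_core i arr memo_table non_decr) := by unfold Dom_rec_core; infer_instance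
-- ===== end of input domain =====

-- B replaces A's top-down memoized recursion by a non-mutating iterative bottom-up DP pass
-- (A mutates memo_table in place; the equivalence proved here is about the RETURN value only —
-- B performs no mutation).

-- ===== PORT A =====
-- arr[j] as both ports read it (Pre_ guarantees every actual read is in range)
def pvGetA (arr : List Int) (j : Int) : Int := (PySem.List.pyGet? arr j).getD 0
-- bin_op = operator.le if non_decr else operator.ge
def pvCond (arr : List Int) (nd : Bool) (k j : Int) : Bool :=
  if nd then decide (pvGetA arr k ≤ pvGetA arr j) else decide (pvGetA arr j ≤ pvGetA arr k)

-- A's recursion, threading the (mutated) memo dict through; fuel is only a termination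
-- guard (initial fuel i.toNat + 1 is never exhausted, recursion depth drops by 1 per call)
def recA (arr : List Int) (nd : Bool) : Nat → Int → PySem.Dict Int Int → Int × PySem.Dict Int Int
  | fuel, i, m =>
    match PySem.Dict.get? m i with
    | some v => (v, m)
    | none =>
      match fuel with
      | 0 => (0, m)
      | fuel' + 1 =>
        let res :=
          if i ≠ 0 then
            (PySem.List.pyRange 0 i 1).foldl
              (fun cm ind =>
                if pvCond arr nd ind i then
                  let r := recA arr nd fuel' ind cm.2
                  (cm.1 + r.1, r.2)
                else cm)
              (1, m)
          else (1, m)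
        (res.1, res.2.insert i res.1)

def rec_core (i : Int) (arr : List Int) (memo_table : List (Int × Int)) (non_decr : Bool) : Int :=
  (recA arr non_decr (i.toNat + 1) i (PySem.Dict.mk memo_table)).1

-- ===== PORT B =====
-- one dp entry: memo_table[j] if present, else 1 + sum(dp[k] for k in range(j) if bin_op(arr[k], arr[j]))
def stepB (arr : List Int) (memo : PySem.Dict Int Int) (nd : Bool) (dp : List Int) (j : Int) : Int :=
  match PySem.Dict.get? memo j with
  | some v => v
  | none =>
      1 + (PySem.List.pyRange 0 j 1).foldl
            (fun s k => if pvCond arr nd k j then s + (PySem.List.pyGet? dp k).getD 0 else s) 0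

def rec_core_alt (i : Int) (arr : List Int) (memo_table : List (Int × Int)) (non_decr : Bool) : Int :=
  let memo := PySem.Dict.mk memo_table
  match PySem.Dict.get? memo i with
  | some v => v
  | none =>
      let dp := (PySem.List.pyRange 0 (i + 1) 1).foldl
                  (fun dp j => dp ++ [stepB arr memo non_decr dp j]) []
      (PySem.List.pyGet? dp i).getD 0   -- dp[i]; Python raises here for i < 0, excluded by Pre_

-- ===== PRECONDITION & SPEC =====
-- Pre_ excludes (a) the inputs on which the Python A raises IndexError — an unmemoized
-- i ≥ max(1, len(arr)), where A evaluates arr[i] — and (b) unmemoized negative i, which is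
-- outside the function's natural domain: A's returned 1 there is an artefact of range(i)
-- being empty, and B's dp naturally raises IndexError there.
def Pre_rec_core (i : Int) (arr : List Int) (memo_table : List (Int × Int)) (non_decr : Bool) : Prop :=
  ((PySem.Dict.mk memo_table).contains i = true) ∨ (0 ≤ i ∧ (i < (arr.length : Int) ∨ i = 0))
instance (i : Int) (arr : List Int) (memo_table : List (Int × Int)) (non_decr : Bool) : Decidable (Pre_rec_core i arr memo_table non_decr) := by unfold Pre_rec_core; infer_instance

def pvWitness_rec_core : Int × List Int × (List (Int × Int)) × Bool := (2, [1, 3, 2], [(0, 1)], true)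

def Spec_rec_core (i : Int) (arr : List Int) (memo_table : List (Int × Int)) (non_decr : Bool) (out : Int) : Prop := out = rec_core_alt i arr memo_table non_decr
instance (i : Int) (arr : List Int) (memo_table : List (Int × Int)) (non_decr : Bool) (out : Int) : Decidable (Spec_rec_core i arr memo_table non_decr out) := by unfold Spec_rec_core; infer_instance

-- ===== CLAIM (what is proved, stated in full; the proofs are below) =====
def Claim_equal_rec_core : Prop := ∀ (i : Int) (arr : List Int) (memo_table : List (Int × Int)) (non_decr : Bool), Dom_rec_core i arr memo_table non_decr → Pre_rec_core i arr memo_table non_decr → Spec_rec_core i arr memo_table non_decr (rec_core i arr memo_table non_decr)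

-- ===== LEMMAS AND PROOFS =====

-- the bottom-up dp table, one entry at a time (proof-side mirror of B's outer fold)
def dpN (arr : List Int) (memo : PySem.Dict Int Int) (nd : Bool) : Nat → List Int
  | 0 => []
  | n + 1 => dpN arr memo nd n ++ [stepB arr memo nd (dpN arr memo nd n) (n : Int)]

-- the common reference value of entry j
def gN (arr : List Int) (memo : PySem.Dict Int Int) (nd : Bool) (j : Nat) : Int :=
  stepB arr memo nd (dpN arr memo nd j) (j : Int)

-- reference value at an arbitrary Int index (what A returns; B agrees for unmemoized i only when 0 ≤ i)
def Fv (arr : List Int) (memo : PySem.Dict Int Int) (nd : Bool) (i : Int) : Int :=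
  match PySem.Dict.get? memo i with
  | some v => v
  | none => if i < 0 then 1 else gN arr memo nd i.toNat

theorem length_dpN (arr : List Int) (memo : PySem.Dict Int Int) (nd : Bool) (n : Nat) :
    (dpN arr memo nd n).length = n := by
  induction n with
  | zero => rfl
  | succ n ih => simp [dpN, ih]

theorem get_dpN (arr : List Int) (memo : PySem.Dict Int Int) (nd : Bool) :
    ∀ n k : Nat, k < n →
      PySem.List.pyGet? (dpN arr memo nd n) (k : Int) = some (gN arr memo nd k) := by
  intro n
  induction n with
  | zero => intro k hk; omega
  | succ n ih =>
      intro k hk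
      rw [PySem.List.pyGet?_natCast, dpN]
      rcases Nat.lt_or_ge k n with h | h
      · rw [List.getElem?_append_left (by rw [length_dpN]; exact h)]
        rw [← PySem.List.pyGet?_natCast]
        exact ih k h
      · have hk : k = n := by omega
        subst hk
        rw [List.getElem?_append_right (by rw [length_dpN])]
        simp [length_dpN, gN]

theorem Fv_eq_gN (arr : List Int) (memo : PySem.Dict Int Int) (nd : Bool) (k : Nat) :
    Fv arr memo nd (k : Int) = gN arr memo nd k := by
  unfold Fv
  cases h : PySem.Dict.get? memo (k : Int) with
  | none => simp [Int.toNat_natCast]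
  | some v => unfold gN stepB; rw [h]

theorem gN_recurrence (arr : List Int) (memo : PySem.Dict Int Int) (nd : Bool) (i : Int)
    (hi : 0 ≤ i) (hmemo : PySem.Dict.get? memo i = none) :
    gN arr memo nd i.toNat =
      (PySem.List.pyRange 0 i 1).foldl
        (fun s k => if pvCond arr nd k i then s + Fv arr memo nd k else s) 1 := by
  have hcast : ((i.toNat : Nat) : Int) = i := Int.toNat_of_nonneg hi
  unfold gN stepB
  rw [hcast, hmemo]
  have h1 : (PySem.List.pyRange 0 i 1).foldl
      (fun s k => if pvCond arr nd k i then s + (PySem.List.pyGet? (dpN arr memo nd i.toNat) k).getD 0 else s) 0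
      = (PySem.List.pyRange 0 i 1).foldl
      (fun s k => s + (if pvCond arr nd k i then Fv arr memo nd k else 0)) 0 := by
    apply PySem.List.foldl_congr_mem
    intro s k hk
    obtain ⟨hk0, hki⟩ := PySem.List.mem_pyRange_one.mp hk
    have hkc : ((k.toNat : Nat) : Int) = k := Int.toNat_of_nonneg hk0
    have hlt : k.toNat < i.toNat := by omega
    rw [← hkc, get_dpN arr memo nd i.toNat k.toNat hlt, Fv_eq_gN]
    simp
    split <;> simp
  have h2 : (PySem.List.pyRange 0 i 1).foldl
      (fun s k => if pvCond arr nd k i then s + Fv arr memo nd k else s) 1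
      = (PySem.List.pyRange 0 i 1).foldl
      (fun s k => s + (if pvCond arr nd k i then Fv arr memo nd k else 0)) 1 := by
    apply PySem.List.foldl_congr_mem
    intro s k _
    split <;> simp
  rw [h1, h2, PySem.List.foldl_add, PySem.List.foldl_add]
  ring

theorem recA_main (arr : List Int) (nd : Bool) (memo : PySem.Dict Int Int) :
    ∀ (fuel : Nat) (i : Int) (m : PySem.Dict Int Int),
      i.toNat < fuel →
      (∀ j v, PySem.Dict.get? m j = some v → v = Fv arr memo nd j) →
      (∀ j, (PySem.Dict.get? memo j).isSome = true → (PySem.Dict.get? m j).isSome = true) →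
      (recA arr nd fuel i m).1 = Fv arr memo nd i
      ∧ (∀ j v, PySem.Dict.get? (recA arr nd fuel i m).2 j = some v → v = Fv arr memo nd j)
      ∧ (∀ j, (PySem.Dict.get? m j).isSome = true →
            (PySem.Dict.get? (recA arr nd fuel i m).2 j).isSome = true) := by
  intro fuel
  induction fuel with
  | zero => intro i m hfuel _ _; omega
  | succ f ih =>
      intro i m hfuel hinv1 hinv2
      rw [recA]
      cases h : PySem.Dict.get? m i with
      | some v =>
          simp only
          exact ⟨hinv1 i v h, hinv1, fun j hj => by simpa using hj⟩
      | none =>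
          simp only
          have hmemoi : PySem.Dict.get? memo i = none := by
            cases hm : PySem.Dict.get? memo i with
            | none => rfl
            | some w =>
                have := hinv2 i (by simp [hm])
                rw [h] at this; simp at this
          -- the loop invariant, for any list of indices below the fuel bound
          have fold_lem : ∀ (l : List Int), (∀ k ∈ l, 0 ≤ k ∧ k.toNat < f) →
              ∀ (c : Int) (m₀ : PySem.Dict Int Int),
              (∀ j v, PySem.Dict.get? m₀ j = some v → v = Fv arr memo nd j) →
              (∀ j, (PySem.Dict.get? memo j).isSome = true → (PySem.Dict.get? m₀ j).isSome = true) →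
              (l.foldl (fun cm ind =>
                  if pvCond arr nd ind i then
                    ((cm.1 + (recA arr nd f ind cm.2).1 : Int), (recA arr nd f ind cm.2).2)
                  else cm) (c, m₀)).1
                = l.foldl (fun s k => if pvCond arr nd k i then s + Fv arr memo nd k else s) c
              ∧ (∀ j v, PySem.Dict.get? (l.foldl (fun cm ind =>
                  if pvCond arr nd ind i then
                    ((cm.1 + (recA arr nd f ind cm.2).1 : Int), (recA arr nd f ind cm.2).2)
                  else cm) (c, m₀)).2 j = some v → v = Fv arr memo nd j)
              ∧ (∀ j, (PySem.Dict.get? m₀ j).isSome = true →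
                  (PySem.Dict.get? (l.foldl (fun cm ind =>
                  if pvCond arr nd ind i then
                    ((cm.1 + (recA arr nd f ind cm.2).1 : Int), (recA arr nd f ind cm.2).2)
                  else cm) (c, m₀)).2 j).isSome = true) := by
            intro l
            induction l with
            | nil => intro _ c m₀ h1 h2; exact ⟨rfl, h1, fun j hj => hj⟩
            | cons k l ihl =>
                intro hl c m₀ h1 h2
                obtain ⟨hk0, hkf⟩ := hl k (List.mem_cons_self)
                by_cases hc : pvCond arr nd k i = true
                · simp only [List.foldl_cons, hc, if_pos]
                  obtain ⟨hval, hi1, hmono⟩ := ih k m₀ hkf h1 h2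
                  obtain ⟨rv, ri1, rmono⟩ := ihl (fun k hk => hl k (List.mem_cons_of_mem _ hk))
                    (c + (recA arr nd f k m₀).1) (recA arr nd f k m₀).2 hi1
                    (fun j hj => hmono j (h2 j hj))
                  refine ⟨?_, ri1, fun j hj => rmono j (hmono j hj)⟩
                  rw [rv, hval]
                · simp only [List.foldl_cons, hc, if_neg, Bool.false_eq_true, not_false_iff]
                  exact ihl (fun k hk => hl k (List.mem_cons_of_mem _ hk)) c m₀ h1 h2
          by_cases hz : i = 0
          · subst hz
            simp only [ne_eq, not_true_eq_false, if_false]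
            have hFv : Fv arr memo nd 0 = 1 := by
              simp [Fv, hmemoi, gN, stepB, PySem.List.pyRange_one_eq_nil]
            refine ⟨hFv.symm, ?_, ?_⟩
            · intro j v hj
              rw [PySem.Dict.get?_insert] at hj
              split at hj
              · next hji => subst hji; rw [hFv]; exact (Option.some_inj.mp hj).symm
              · exact hinv1 j v hj
            · intro j hj
              rw [PySem.Dict.get?_insert]
              split
              · simp
              · exact hj
          · rcases Int.lt_or_le i 0 with hneg | hpos
            · simp only [ne_eq, hz, not_false_iff, if_true,
                PySem.List.pyRange_one_eq_nil (by omega : i ≤ 0), List.foldl_nil]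
              have hFv : Fv arr memo nd i = 1 := by
                simp [Fv, hmemoi, if_pos hneg]
              refine ⟨hFv.symm, ?_, ?_⟩
              · intro j v hj
                rw [PySem.Dict.get?_insert] at hj
                split at hj
                · next hji => subst hji; rw [hFv]; exact (Option.some_inj.mp hj).symm
                · exact hinv1 j v hj
              · intro j hj
                rw [PySem.Dict.get?_insert]
                split
                · simp
                · exact hj
            · -- 0 < i (i ≠ 0, 0 ≤ i)
              have hl : ∀ k ∈ PySem.List.pyRange 0 i 1, 0 ≤ k ∧ k.toNat < f := by
                intro k hk
                obtain ⟨hk0, hki⟩ := PySem.List.mem_pyRange_one.mp hk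
                constructor
                · exact hk0
                · omega
              obtain ⟨hval, hi1, hmono⟩ := fold_lem (PySem.List.pyRange 0 i 1) hl 1 m hinv1 hinv2
              simp only [ne_eq, hz, not_false_iff, if_true]
              have hFv : Fv arr memo nd i =
                  (PySem.List.pyRange 0 i 1).foldl
                    (fun s k => if pvCond arr nd k i then s + Fv arr memo nd k else s) 1 := by
                rw [Fv]; rw [hmemoi]
                simp only [if_neg (by omega : ¬ i < 0)]
                exact gN_recurrence arr memo nd i hpos hmemoi
              refine ⟨by rw [hval, hFv], ?_, ?_⟩
              · intro j v hj
                rw [PySem.Dict.get?_insert] at hj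
                split at hj
                · next hji =>
                    subst hji
                    rw [← (Option.some_inj.mp hj), hval, hFv]
                · exact hi1 j v hj
              · intro j hj
                rw [PySem.Dict.get?_insert]
                split
                · simp
                · exact hmono j hj

theorem rec_core_eq_Fv (i : Int) (arr : List Int) (memo_table : List (Int × Int)) (nd : Bool) :
    rec_core i arr memo_table nd = Fv arr (PySem.Dict.mk memo_table) nd i := by
  have h := recA_main arr nd (PySem.Dict.mk memo_table) (i.toNat + 1) i (PySem.Dict.mk memo_table)
    (by omega)
    (fun j v hj => by simp [Fv, hj])
    (fun j hj => hj)
  exact h.1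

theorem dpB_eq_dpN (arr : List Int) (memo : PySem.Dict Int Int) (nd : Bool) (n : Nat) :
    (PySem.List.pyRange 0 (n : Int) 1).foldl
        (fun dp j => dp ++ [stepB arr memo nd dp j]) []
      = dpN arr memo nd n := by
  induction n with
  | zero => simp [PySem.List.pyRange_one_eq_nil, dpN]
  | succ n ih =>
      have : ((n + 1 : Nat) : Int) = (n : Int) + 1 := by push_cast; ring
      rw [this, PySem.List.pyRange_one_succ_right (by positivity), List.foldl_append, ih]
      simp [dpN]

theorem rec_core_alt_eq_Fv (i : Int) (arr : List Int) (memo_table : List (Int × Int)) (nd : Bool)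
    (h : PySem.Dict.get? (PySem.Dict.mk memo_table) i ≠ none ∨ 0 ≤ i) :
    rec_core_alt i arr memo_table nd = Fv arr (PySem.Dict.mk memo_table) nd i := by
  unfold rec_core_alt Fv
  cases hm : PySem.Dict.get? (PySem.Dict.mk memo_table) i with
  | some v => simp [hm]
  | none =>
      simp only [hm]
      have hi : 0 ≤ i := h.resolve_left (not_not_intro hm)
      rw [if_neg (by omega)]
      have hcast : (i + 1) = ((i.toNat + 1 : Nat) : Int) := by omega
      rw [hcast, dpB_eq_dpN, ← Int.toNat_of_nonneg hi]
      simp only [Int.toNat_natCast]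
      rw [get_dpN arr _ nd (i.toNat + 1) i.toNat (by omega)]
      rfl

-- ===== VERDICT (by name: the statement is the Claim_ definition above) =====
theorem rec_core_spec : Claim_equal_rec_core := by
  intro i arr memo_table non_decr _ hpre
  unfold Spec_rec_core
  rw [rec_core_eq_Fv, rec_core_alt_eq_Fv]
  rcases hpre with h | h
  · left
    intro hn
    rw [PySem.Dict.get?_eq_none_iff_contains] at hn
    simp [h] at hn
  · right; exact h.1
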